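-- pv_equiv track=rewrite | github.com/navalvillote/TPV | tpv_project/utils/formatters.py | obtener_listado_lineas
-- ===== SOURCE A (Python) =====
-- from typing import List
--
-- def obtener_listado_lineas(texto: str) -> List[str]:
--     """
--     Convierte un texto en una lista de líneas centradas de 30 caracteres.
--
--     Args:
--         texto: Texto a procesar (con saltos de línea)
--
--     Returns:
--         List[str]: Lista de líneas centradas
--     """
--     lista = texto.split('\n')
--
--     for i, linea in enumerate(lista):
--         if len(linea) < 30:
--             delante = ''
--             detras = ''
--             sw = -1
--             for j in range(30 - len(linea)):
--                 sw *= -1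
--                 if sw == 1:
--                     delante += ' '
--                 else:
--                     detras += ' '
--             lista[i] = delante + linea + detras
--
--     return lista
-- ===== SOURCE B (Python) =====
-- from typing import List
--
-- def obtener_listado_lineas(texto: str) -> List[str]:
--     lineas = texto.split('\n')
--     out = []
--     for linea in lineas:
--         pad = 30 - len(linea)
--         if pad > 0:
--             out.append(' ' * ((pad + 1) // 2) + linea + ' ' * (pad // 2))
--         else:
--             out.append(linea)
--     return out
-- ===== Notes on version B (the rewrite author's own statement) =====
-- stated objective: simpler
-- what changed: Replaced A's alternating char-by-char padding loop (state delante/detras/sw over range(30-len)) with a closed-form per-line build: (pad+1)//2 spaces, then the line, then pad//2 spaces.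
import Mathlib
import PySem

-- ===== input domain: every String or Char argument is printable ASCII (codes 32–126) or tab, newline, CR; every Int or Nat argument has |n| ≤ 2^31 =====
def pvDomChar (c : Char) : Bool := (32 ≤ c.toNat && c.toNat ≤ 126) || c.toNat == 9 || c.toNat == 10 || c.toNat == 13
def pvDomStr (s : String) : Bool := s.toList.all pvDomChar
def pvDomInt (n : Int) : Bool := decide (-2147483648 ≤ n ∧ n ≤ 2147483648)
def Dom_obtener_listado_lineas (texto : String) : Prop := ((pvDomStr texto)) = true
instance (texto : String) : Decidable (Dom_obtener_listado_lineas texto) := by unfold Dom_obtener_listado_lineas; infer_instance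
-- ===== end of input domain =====

-- B replaces A's alternating char-by-char padding loop with the closed form
-- '(pad+1)//2 spaces + line + pad//2 spaces' (objective: simpler; same cost class).

-- ===== PORT A =====
-- the inner "for j in range(30 - len(linea))" loop: state (delante, detras, sw)
def pvPadStepA (st : List Char × List Char × Int) (_j : Int) : List Char × List Char × Int :=
  let sw := st.2.2 * (-1)
  if sw = 1 then (st.1 ++ [' '], st.2.1, sw) else (st.1, st.2.1 ++ [' '], sw)

def pvPadLineA (linea : List Char) : List Char :=
  if linea.length < 30 then
    let st := (PySem.List.pyRange 0 (30 - (linea.length : Int))).foldl pvPadStepA ([], [], -1)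
    st.1 ++ linea ++ st.2.1
  else linea

def obtener_listado_lineas (texto : String) : List String :=
  ((PySem.Chars.splitOn texto.toList ['\n']).map pvPadLineA).map String.mk

-- ===== PORT B =====
def pvPadLineB (linea : List Char) : List Char :=
  let pad : Int := 30 - (linea.length : Int)
  if pad > 0 then
    List.replicate (PySem.Int.floordiv (pad + 1) 2).toNat ' ' ++ linea ++
      List.replicate (PySem.Int.floordiv pad 2).toNat ' '
  else linea

def obtener_listado_lineas_alt (texto : String) : List String :=
  (PySem.Chars.splitOn texto.toList ['\n']).map (fun l => String.mk (pvPadLineB l))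

-- ===== PRECONDITION & SPEC =====
def Spec_obtener_listado_lineas (texto : String) (out : List String) : Prop := out = obtener_listado_lineas_alt texto
instance (texto : String) (out : List String) : Decidable (Spec_obtener_listado_lineas texto out) := by unfold Spec_obtener_listado_lineas; infer_instance

-- ===== CLAIM (what is proved, stated in full; the proofs are below) =====
def Claim_equal_obtener_listado_lineas : Prop := ∀ (texto : String), Dom_obtener_listado_lineas texto → Spec_obtener_listado_lineas texto (obtener_listado_lineas texto)

-- ===== LEMMAS AND PROOFS =====

theorem pvReplSnoc (m m' : Nat) (h : m' = m + 1) :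
    List.replicate m ' ' ++ [' '] = List.replicate m' ' ' := by
  subst h; exact List.replicate_succ'.symm

-- the alternating loop produces ⌈n/2⌉ front spaces and ⌊n/2⌋ back spaces
theorem pvPadLoop_eq (n : Nat) :
    (PySem.List.pyRange 0 (n : Int)).foldl pvPadStepA ([], [], -1) =
      (List.replicate ((n + 1) / 2) ' ', List.replicate (n / 2) ' ',
        if n % 2 = 1 then (1 : Int) else -1) := by
  induction n with
  | zero => decide
  | succ n ih =>
    have h : ((n + 1 : Nat) : Int) = (n : Int) + 1 := by push_cast; ring
    rw [h, PySem.List.pyRange_one_succ_right (by positivity), List.foldl_append, ih]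
    simp only [List.foldl_cons, List.foldl_nil]
    unfold pvPadStepA
    rcases Nat.even_or_odd n with he | ho
    · have h0 : n % 2 = 0 := Nat.even_iff.mp he
      simp only [h0]
      norm_num
      exact ⟨pvReplSnoc _ _ (by omega), by omega, by omega⟩
    · have h1 : n % 2 = 1 := Nat.odd_iff.mp ho
      simp only [h1]
      norm_num
      exact ⟨by omega, pvReplSnoc _ _ (by omega), by omega⟩

theorem pvPadLine_eq (linea : List Char) : pvPadLineA linea = pvPadLineB linea := by
  unfold pvPadLineA pvPadLineB
  by_cases h : linea.length < 30
  · rw [if_pos h, if_pos (by omega : (30:Int) - (linea.length : Int) > 0)]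
    have hcast : (30 : Int) - (linea.length : Int) = ((30 - linea.length : Nat) : Int) := by omega
    rw [hcast, pvPadLoop_eq]
    have e1 : (PySem.Int.floordiv (((30 - linea.length : Nat) : Int) + 1) 2).toNat = (30 - linea.length + 1) / 2 := by
      rw [show ((30 - linea.length : Nat) : Int) + 1 = ((30 - linea.length + 1 : Nat) : Int) by push_cast; ring]
      rw [show (PySem.Int.floordiv ((30 - linea.length + 1 : Nat) : Int) 2) = (((30 - linea.length + 1) / 2 : Nat) : Int) from by exact_mod_cast PySem.Int.floordiv_natCast (30 - linea.length + 1) 2]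
      omega
    have e2 : (PySem.Int.floordiv ((30 - linea.length : Nat) : Int) 2).toNat = (30 - linea.length) / 2 := by
      rw [show (PySem.Int.floordiv ((30 - linea.length : Nat) : Int) 2) = (((30 - linea.length) / 2 : Nat) : Int) from by exact_mod_cast PySem.Int.floordiv_natCast (30 - linea.length) 2]
      omega
    rw [e1, e2]
  · rw [if_neg h, if_neg (by omega : ¬ ((30:Int) - (linea.length : Int) > 0))]

-- ===== VERDICT (by name: the statement is the Claim_ definition above) =====
theorem obtener_listado_lineas_spec : Claim_equal_obtener_listado_lineas := by
  intro texto _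
  unfold Spec_obtener_listado_lineas obtener_listado_lineas obtener_listado_lineas_alt
  rw [List.map_map]
  exact List.map_congr_left (fun l _ => by simp [Function.comp, pvPadLine_eq])
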